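-- pv_equiv track=rewrite | github.com/rupeshmohanty/Competitive-programming-problems | Python/w3resource/requiredSum.py | requiredSum
-- ===== SOURCE A (Python) =====
-- def requiredSum(a,b,c,t):
-- 	res = []
--
-- 	for i in a:
-- 		for j in b:
-- 			for k in c:
-- 				s = 0
--
-- 				s += i + j + k
--
-- 				if s == t:
-- 					res.append((i,j,k))
--
-- 	return res
-- ===== SOURCE B (Python) =====
-- def requiredSum(a, b, c, t):
--     cnt = {}
--     for k in c:
--         cnt[k] = cnt.get(k, 0) + 1
--     res = []
--     for i in a:
--         for j in b:
--             k = t - i - j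
--             res.extend([(i, j, k)] * cnt.get(k, 0))
--     return res
-- ===== Notes on version B (the rewrite author's own statement) =====
-- stated objective: faster
-- what changed: Replaced the triple nested scan with a hash counter over c built once, so each (i,j) pair does a single lookup of t-i-j and emits that many triples, removing the inner loop over c.
import Mathlib
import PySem

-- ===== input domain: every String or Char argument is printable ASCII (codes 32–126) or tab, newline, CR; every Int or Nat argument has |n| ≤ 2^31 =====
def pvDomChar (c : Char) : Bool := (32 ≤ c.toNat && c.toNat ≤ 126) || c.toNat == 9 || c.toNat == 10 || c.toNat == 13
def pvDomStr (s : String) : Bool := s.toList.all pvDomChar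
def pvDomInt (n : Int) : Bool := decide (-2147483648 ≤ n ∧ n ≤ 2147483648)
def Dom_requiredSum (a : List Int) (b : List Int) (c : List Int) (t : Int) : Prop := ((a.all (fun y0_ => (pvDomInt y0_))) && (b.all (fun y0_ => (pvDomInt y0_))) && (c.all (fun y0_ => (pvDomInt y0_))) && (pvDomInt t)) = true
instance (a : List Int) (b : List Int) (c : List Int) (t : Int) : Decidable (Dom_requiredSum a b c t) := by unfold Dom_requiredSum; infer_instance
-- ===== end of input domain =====

-- B replaces A's triple nested scan by a counter dict over c built once, with one lookup per (i,j) pair (asymptotically faster).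

-- ===== PORT A =====
def requiredSum (a : List Int) (b : List Int) (c : List Int) (t : Int) : List (Int × Int × Int) :=
  a.foldl (fun res i =>
    b.foldl (fun res j =>
      c.foldl (fun res k =>
        let s : Int := 0
        let s := s + (i + j + k)
        if s == t then res ++ [(i, j, k)] else res) res) res) []

-- ===== PORT B =====
def requiredSum_alt (a : List Int) (b : List Int) (c : List Int) (t : Int) : List (Int × Int × Int) :=
  let cnt : PySem.Dict Int Int := c.foldl (fun d k => d.insert k (d.getD k 0 + 1)) PySem.Dict.empty
  a.foldl (fun res i =>
    b.foldl (fun res j =>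
      let k := t - i - j
      res ++ List.replicate (cnt.getD k 0).toNat (i, j, k)) res) []

-- ===== PRECONDITION & SPEC =====
def Spec_requiredSum (a : List Int) (b : List Int) (c : List Int) (t : Int) (out : List (Int × Int × Int)) : Prop := out = requiredSum_alt a b c t
instance (a : List Int) (b : List Int) (c : List Int) (t : Int) (out : List (Int × Int × Int)) : Decidable (Spec_requiredSum a b c t out) := by unfold Spec_requiredSum; infer_instance

-- ===== CLAIM (what is proved, stated in full; the proofs are below) =====
def Claim_equal_requiredSum : Prop := ∀ (a : List Int) (b : List Int) (c : List Int) (t : Int), Dom_requiredSum a b c t → Spec_requiredSum a b c t (requiredSum a b c t)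

-- ===== LEMMAS AND PROOFS =====

-- A's inner loop over c collects count-many copies of (i,j,t-i-j).
theorem innerC (c : List Int) (i j t : Int) (res : List (Int × Int × Int)) :
    c.foldl (fun res k =>
        let s : Int := 0
        let s := s + (i + j + k)
        if s == t then res ++ [(i, j, k)] else res) res
      = res ++ List.replicate (c.count (t - i - j)) (i, j, t - i - j) := by
  induction c generalizing res with
  | nil => simp
  | cons k c ih =>
    simp only [List.foldl_cons, List.count_cons, ih]
    by_cases h : 0 + (i + j + k) = t
    · have hk : k = t - i - j := by omega
      subst hk
      simp [List.replicate_succ]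
    · simp only [beq_iff_eq, if_neg h, if_neg (show ¬ k = t - i - j by omega)]
      simp

theorem requiredSum_eq (a b c : List Int) (t : Int) :
    requiredSum a b c t = requiredSum_alt a b c t := by
  unfold requiredSum requiredSum_alt
  simp only [PySem.Dict.foldl_insert_getD_add_one_eq_counter, PySem.Dict.getD_counter]
  congr 1
  funext res i
  congr 1
  funext res j
  rw [innerC]
  simp

-- ===== VERDICT (by name: the statement is the Claim_ definition above) =====
theorem requiredSum_spec : Claim_equal_requiredSum := by
  intro a b c t _
  unfold Spec_requiredSum
  exact requiredSum_eq a b c t
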